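-- pv_equiv track=rewrite | github.com/RobertIonut19/Python-Chess-Engine | Labs/Laborator_3/6.py | unique_and_duplicate_elements
-- ===== SOURCE A (Python) =====
-- def unique_and_duplicate_elements(input_list):
--     input_set = set(input_list)
--     duplicate_elements = set()
--     for i in input_set:
--         if input_list.count(i) > 1:
--             duplicate_elements.add(i)
--
--     unique_elements = input_set - set(duplicate_elements)
--
--     return (len(unique_elements), len(duplicate_elements))
-- ===== SOURCE B (Python) =====
-- def unique_and_duplicate_elements(input_list):
--     seen = set()
--     dup = set()
--     for x in input_list:
--         if x in seen:
--             dup.add(x)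
--         else:
--             seen.add(x)
--     unique = seen - dup
--     return (len(unique), len(dup))
-- ===== Notes on version B (the rewrite author's own statement) =====
-- stated objective: faster
-- what changed: Single pass over the full list maintaining seen/dup sets, replacing A's loop over the distinct elements that rescans the whole list with .count for each.
import Mathlib
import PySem

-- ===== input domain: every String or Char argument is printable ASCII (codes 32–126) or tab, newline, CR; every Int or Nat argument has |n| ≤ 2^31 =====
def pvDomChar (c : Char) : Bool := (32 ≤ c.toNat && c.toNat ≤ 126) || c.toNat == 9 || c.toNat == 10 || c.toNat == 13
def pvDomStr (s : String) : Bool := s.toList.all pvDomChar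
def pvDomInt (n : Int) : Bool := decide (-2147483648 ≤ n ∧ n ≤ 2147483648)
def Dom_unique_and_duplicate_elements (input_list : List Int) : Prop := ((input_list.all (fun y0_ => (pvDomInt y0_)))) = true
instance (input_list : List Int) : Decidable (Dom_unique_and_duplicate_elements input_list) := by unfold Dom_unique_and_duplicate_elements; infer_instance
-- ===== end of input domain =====

-- B replaces A's loop-over-distinct-elements-with-.count by a single pass keeping `seen` and `dup` sets (asymptotically faster).


-- ===== PORT A =====
-- (Python iterates over the set; the result only counts, so it is order-independent)
def unique_and_duplicate_elements (input_list : List Int) : Int × Int :=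
  let input_set : PySem.Set Int := PySem.Set.ofList input_list
  let duplicate_elements : PySem.Set Int :=
    input_set.foldl
      (fun d i => if PySem.List.count input_list i > 1 then PySem.Set.add d i else d)
      PySem.Set.empty
  let unique_elements : PySem.Set Int := PySem.Set.diff input_set duplicate_elements
  (PySem.Set.len unique_elements, PySem.Set.len duplicate_elements)

-- ===== PORT B =====
def unique_and_duplicate_elements_alt (input_list : List Int) : Int × Int :=
  let sd : PySem.Set Int × PySem.Set Int :=
    input_list.foldl
      (fun p x =>
        if PySem.Set.contains p.1 x then (p.1, PySem.Set.add p.2 x)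
        else (PySem.Set.add p.1 x, p.2))
      (PySem.Set.empty, PySem.Set.empty)
  let unique : PySem.Set Int := PySem.Set.diff sd.1 sd.2
  (PySem.Set.len unique, PySem.Set.len sd.2)

-- ===== PRECONDITION & SPEC =====
def Spec_unique_and_duplicate_elements (input_list : List Int) (out : Int × Int) : Prop := out = unique_and_duplicate_elements_alt input_list
instance (input_list : List Int) (out : Int × Int) : Decidable (Spec_unique_and_duplicate_elements input_list out) := by unfold Spec_unique_and_duplicate_elements; infer_instance

-- ===== CLAIM (what is proved, stated in full; the proofs are below) =====
def Claim_equal_unique_and_duplicate_elements : Prop := ∀ (input_list : List Int), Dom_unique_and_duplicate_elements input_list → Spec_unique_and_duplicate_elements input_list (unique_and_duplicate_elements input_list)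

-- ===== LEMMAS AND PROOFS =====

-- two Nodup lists with the same members have the same length
theorem pv_len_eq_of_nodup_mem {l₁ l₂ : List Int} (h1 : l₁.Nodup) (h2 : l₂.Nodup)
    (h : ∀ x, x ∈ l₁ ↔ x ∈ l₂) : l₁.length = l₂.length :=
  ((List.perm_ext_iff_of_nodup h1 h2).mpr h).length_eq

-- A's filtering fold: nodup and membership characterisation
theorem pv_foldA (p : Int → Prop) [DecidablePred p] (l : List Int) (acc : List Int)
    (hacc : acc.Nodup) :
    (l.foldl (fun d i => if p i then PySem.Set.add d i else d) acc).Nodup ∧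
    (∀ x, x ∈ l.foldl (fun d i => if p i then PySem.Set.add d i else d) acc ↔
      x ∈ acc ∨ (x ∈ l ∧ p x)) := by
  induction l generalizing acc with
  | nil => simp [hacc]
  | cons a l ih =>
    by_cases hp : p a
    · have h := ih (PySem.Set.add acc a) (PySem.Set.nodup_add acc a hacc)
      rw [List.foldl_cons, if_pos hp]
      refine ⟨h.1, fun x => ?_⟩
      rw [h.2 x, PySem.Set.mem_add]
      constructor
      · rintro (⟨h|h⟩|⟨h1,h2⟩)
        · exact Or.inl h
        · exact Or.inr ⟨by simp [h], h ▸ hp⟩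
        · exact Or.inr ⟨List.mem_cons_of_mem _ h1, h2⟩
      · rintro (h|⟨h1,h2⟩)
        · exact Or.inl (Or.inl h)
        · rcases List.mem_cons.mp h1 with h1|h1
          · exact Or.inl (Or.inr h1)
          · exact Or.inr ⟨h1, h2⟩
    · have h := ih acc hacc
      rw [List.foldl_cons, if_neg hp]
      refine ⟨h.1, fun x => ?_⟩
      rw [h.2 x]
      constructor
      · rintro (h|⟨h1,h2⟩)
        · exact Or.inl h
        · exact Or.inr ⟨List.mem_cons_of_mem _ h1, h2⟩
      · rintro (h|⟨h1,h2⟩)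
        · exact Or.inl h
        · rcases List.mem_cons.mp h1 with h1|h1
          · exact absurd (h1 ▸ h2) hp
          · exact Or.inr ⟨h1, h2⟩

-- B's one-pass fold invariant, with c the counts of the already-processed prefix
theorem pv_foldB (l : List Int) :
    ∀ (s d : List Int) (c : Int → Nat),
      s.Nodup → d.Nodup →
      (∀ x, x ∈ s ↔ 1 ≤ c x) → (∀ x, x ∈ d ↔ 2 ≤ c x) →
      (l.foldl (fun (p : List Int × List Int) x =>
          if PySem.Set.contains p.1 x then (p.1, PySem.Set.add p.2 x)
          else (PySem.Set.add p.1 x, p.2)) (s, d)).1.Nodup ∧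
      (l.foldl (fun (p : List Int × List Int) x =>
          if PySem.Set.contains p.1 x then (p.1, PySem.Set.add p.2 x)
          else (PySem.Set.add p.1 x, p.2)) (s, d)).2.Nodup ∧
      (∀ x, x ∈ (l.foldl (fun (p : List Int × List Int) x =>
          if PySem.Set.contains p.1 x then (p.1, PySem.Set.add p.2 x)
          else (PySem.Set.add p.1 x, p.2)) (s, d)).1 ↔ 1 ≤ c x + l.count x) ∧
      (∀ x, x ∈ (l.foldl (fun (p : List Int × List Int) x =>
          if PySem.Set.contains p.1 x then (p.1, PySem.Set.add p.2 x)
          else (PySem.Set.add p.1 x, p.2)) (s, d)).2 ↔ 2 ≤ c x + l.count x) := by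
  induction l with
  | nil => intro s d c hs hd hsm hdm; simpa using ⟨hs, hd, hsm, hdm⟩
  | cons a l ih =>
    intro s d c hs hd hsm hdm
    by_cases ha : a ∈ s
    · have hc : (1 : Nat) ≤ c a := (hsm a).mp ha
      have hcontains : PySem.Set.contains s a = true := (PySem.Set.contains_iff _ _).mpr ha
      have h := ih s (PySem.Set.add d a) (fun x => if x = a then c x + 1 else c x)
        hs (PySem.Set.nodup_add d a hd)
        (fun x => by
          by_cases hx : x = a
          · subst hx; simp [ha]
          · simp [hx, hsm x])
        (fun x => by
          rw [PySem.Set.mem_add]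
          by_cases hx : x = a
          · subst hx; simp; omega
          · simp [hx, hdm x])
      rw [List.foldl_cons, if_pos hcontains]
      refine ⟨h.1, h.2.1, fun x => ?_, fun x => ?_⟩
      · rw [h.2.2.1 x]
        by_cases hx : x = a
        · subst hx; simp; omega
        · simp [hx, Ne.symm hx]
      · rw [h.2.2.2 x]
        by_cases hx : x = a
        · subst hx; simp; omega
        · simp [hx, Ne.symm hx]
    · have hc : c a = 0 := by
        by_contra h0
        exact ha ((hsm a).mpr (by omega))
      have hcontains : ¬ PySem.Set.contains s a = true := fun h0 =>
        ha ((PySem.Set.contains_iff _ _).mp h0)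
      have h := ih (PySem.Set.add s a) d (fun x => if x = a then c x + 1 else c x)
        (PySem.Set.nodup_add s a hs) hd
        (fun x => by
          rw [PySem.Set.mem_add]
          by_cases hx : x = a
          · subst hx; simp
          · simp [hx, hsm x])
        (fun x => by
          by_cases hx : x = a
          · subst hx; simp [hdm, hc]
          · simp [hx, hdm x])
      rw [List.foldl_cons, if_neg hcontains]
      refine ⟨h.1, h.2.1, fun x => ?_, fun x => ?_⟩
      · rw [h.2.2.1 x]
        by_cases hx : x = a
        · subst hx; simp; omega
        · simp [hx, Ne.symm hx]
      · rw [h.2.2.2 x]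
        by_cases hx : x = a
        · subst hx; simp; omega
        · simp [hx, Ne.symm hx]

-- ===== VERDICT (by name: the statement is the Claim_ definition above) =====
theorem unique_and_duplicate_elements_spec : Claim_equal_unique_and_duplicate_elements := by
  intro l _
  have hB := pv_foldB l PySem.Set.empty PySem.Set.empty (fun _ => 0)
    (by simp [PySem.Set.empty]) (by simp [PySem.Set.empty])
    (by simp [PySem.Set.empty]) (by simp [PySem.Set.empty])
  have hA := pv_foldA (fun i => PySem.List.count l i > 1) (PySem.Set.ofList l)
    PySem.Set.empty (by simp [PySem.Set.empty])
  simp only [] at hA hB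
  have hBsm : ∀ x, x ∈ (l.foldl (fun (p : List Int × List Int) x =>
      if PySem.Set.contains p.1 x then (p.1, PySem.Set.add p.2 x)
      else (PySem.Set.add p.1 x, p.2)) (PySem.Set.empty, PySem.Set.empty)).1 ↔
      1 ≤ l.count x := by simpa using hB.2.2.1
  have hBdm : ∀ x, x ∈ (l.foldl (fun (p : List Int × List Int) x =>
      if PySem.Set.contains p.1 x then (p.1, PySem.Set.add p.2 x)
      else (PySem.Set.add p.1 x, p.2)) (PySem.Set.empty, PySem.Set.empty)).2 ↔
      2 ≤ l.count x := by simpa using hB.2.2.2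
  have hAdm : ∀ x, x ∈ ((PySem.Set.ofList l).foldl
      (fun d i => if PySem.List.count l i > 1 then PySem.Set.add d i else d)
      PySem.Set.empty) ↔ 2 ≤ l.count x := by
    intro x
    rw [hA.2 x]
    simp only [PySem.Set.empty, List.not_mem_nil, false_or, PySem.Set.mem_ofList,
      PySem.List.count_eq]
    constructor
    · rintro ⟨_, h⟩; omega
    · intro h
      refine ⟨List.count_pos_iff.mp (by omega), by omega⟩
  have hdup_len : ((PySem.Set.ofList l).foldl
      (fun d i => if PySem.List.count l i > 1 then PySem.Set.add d i else d)
      PySem.Set.empty).length = (l.foldl (fun (p : List Int × List Int) x =>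
      if PySem.Set.contains p.1 x then (p.1, PySem.Set.add p.2 x)
      else (PySem.Set.add p.1 x, p.2)) (PySem.Set.empty, PySem.Set.empty)).2.length :=
    pv_len_eq_of_nodup_mem hA.1 hB.2.1 (fun x => by rw [hAdm x, hBdm x])
  have huni_len : (PySem.Set.diff (PySem.Set.ofList l) ((PySem.Set.ofList l).foldl
      (fun d i => if PySem.List.count l i > 1 then PySem.Set.add d i else d)
      PySem.Set.empty)).length
      = (PySem.Set.diff (l.foldl (fun (p : List Int × List Int) x =>
      if PySem.Set.contains p.1 x then (p.1, PySem.Set.add p.2 x)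
      else (PySem.Set.add p.1 x, p.2)) (PySem.Set.empty, PySem.Set.empty)).1
      (l.foldl (fun (p : List Int × List Int) x =>
      if PySem.Set.contains p.1 x then (p.1, PySem.Set.add p.2 x)
      else (PySem.Set.add p.1 x, p.2)) (PySem.Set.empty, PySem.Set.empty)).2).length := by
    apply pv_len_eq_of_nodup_mem
      (PySem.Set.nodup_diff _ _ (PySem.Set.nodup_ofList l))
      (PySem.Set.nodup_diff _ _ hB.1)
    intro x
    rw [PySem.Set.mem_diff, PySem.Set.mem_diff, PySem.Set.mem_ofList, hAdm x, hBsm x, hBdm x]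
    constructor
    · rintro ⟨h1, h2⟩
      exact ⟨by simpa using List.count_pos_iff.mpr h1, h2⟩
    · rintro ⟨h1, h2⟩
      exact ⟨List.count_pos_iff.mp (by omega), h2⟩
  show unique_and_duplicate_elements l = unique_and_duplicate_elements_alt l
  simp only [unique_and_duplicate_elements, unique_and_duplicate_elements_alt,
    PySem.Set.len, Prod.mk.injEq]
  exact ⟨by rw [huni_len], by rw [hdup_len]⟩
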